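-- pv_equiv track=rewrite | github.com/gemmas-parra-dominguez/mySolutions | example_hexadecimal_conversion.py | get_hexa_value_string
-- ===== SOURCE A (Python) =====
-- def get_hexa_value_string(value, base = 16):
--     hexa_code = int(value % base)
--     number = int(value / base)
--
--     if (value < base):
--         return str(int(value))
--
--     if hexa_code == 0:
--         if (number < base):
--             return '0' + ',' + str(int(value / base))
--         else:
--             return '0' + ',' + get_hexa_value_string(number)
--
--     return str(hexa_code) + ',' + get_hexa_value_string(number)
-- ===== SOURCE B (Python) =====
-- def get_hexa_value_string(value, base = 16):
--     d0 = int(value % base)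
--     n = int(value / base)
--     if value < base:
--         return str(int(value))
--     if d0 == 0 and n < base:
--         return '0,' + str(n)
--     digits = [d0]
--     while n >= 16:
--         digits.append(int(n % 16))
--         n = int(n / 16)
--     digits.append(int(n))
--     return ','.join(str(d) for d in digits)
-- ===== Notes on version B (the rewrite author's own statement) =====
-- stated objective: alternative
-- what changed: Replaces A's three-branch recursion by a single explicit while-loop that collects the base-16 digits least-significant-first into a list and comma-joins them, keeping A's first division step in the caller's base (A's recursive calls always revert to base 16).
import Mathlib
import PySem

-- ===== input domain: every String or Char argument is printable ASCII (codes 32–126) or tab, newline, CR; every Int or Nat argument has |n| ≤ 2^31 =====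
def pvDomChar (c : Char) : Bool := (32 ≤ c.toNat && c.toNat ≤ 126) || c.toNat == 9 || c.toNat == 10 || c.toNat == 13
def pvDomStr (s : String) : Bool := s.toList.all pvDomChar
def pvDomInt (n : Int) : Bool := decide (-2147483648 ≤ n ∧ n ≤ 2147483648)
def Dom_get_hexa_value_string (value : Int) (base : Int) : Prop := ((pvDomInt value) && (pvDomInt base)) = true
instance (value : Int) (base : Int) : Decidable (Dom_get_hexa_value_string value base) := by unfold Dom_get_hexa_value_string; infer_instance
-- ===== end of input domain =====

-- B replaces A's three-branch recursion by an explicit least-significant-first digit loop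
-- joined with commas; same return value, return value only (no side effects in either).

-- ===== PORT A =====
-- 'int(value / base)' is float division then truncation: on Dom (|value|,|base| ≤ 2^31) the
-- float quotient truncates exactly like integer T-division, so it is ported as Int.tdiv.
-- 'value % base' is Python's floor-mod (sign of the divisor) = PySem.Int.mod.
def get_hexa_value_string (value : Int) (base : Int) : String :=
  let hexa_code := PySem.Int.mod value base
  let number := Int.tdiv value base
  if value < base then PySem.Int.toStr value
  else if hexa_code = 0 then
    if number < base then "0" ++ "," ++ PySem.Int.toStr (Int.tdiv value base)
    else "0" ++ "," ++ get_hexa_value_string number 16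
  else PySem.Int.toStr hexa_code ++ "," ++ get_hexa_value_string number 16
termination_by ((if base = 16 then 0 else 1 : Nat), value.natAbs)
decreasing_by
  · by_cases hb : base = 16
    · subst hb
      refine Prod.Lex.right _ ?_
      have h2 : 0 ≤ Int.tdiv value 16 := Int.tdiv_nonneg (by omega) (by norm_num)
      have h3 : Int.tdiv value 16 < value := by
        have : Int.tdiv value 16 ≤ value / 16 := by
          rw [Int.tdiv_eq_ediv_of_nonneg (by omega)]
        omega
      omega
    · exact Prod.Lex.left _ _ (by simp [hb])
  · by_cases hb : base = 16
    · subst hb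
      refine Prod.Lex.right _ ?_
      have h2 : 0 ≤ Int.tdiv value 16 := Int.tdiv_nonneg (by omega) (by norm_num)
      have h3 : Int.tdiv value 16 < value := by
        have : Int.tdiv value 16 ≤ value / 16 := by
          rw [Int.tdiv_eq_ediv_of_nonneg (by omega)]
        omega
      omega
    · exact Prod.Lex.left _ _ (by simp [hb])

-- ===== PORT B =====
-- the 'while n >= 16' loop of Source B, collecting digits least-significant-first
def pvDigits16 (n : Int) : List Int :=
  if 16 ≤ n then PySem.Int.mod n 16 :: pvDigits16 (Int.tdiv n 16)
  else [n]
termination_by n.natAbs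
decreasing_by
  have h2 : 0 ≤ Int.tdiv n 16 := Int.tdiv_nonneg (by omega) (by norm_num)
  have h3 : Int.tdiv n 16 < n := by
    have : Int.tdiv n 16 ≤ n / 16 := by rw [Int.tdiv_eq_ediv_of_nonneg (by omega)]
    omega
  omega

def get_hexa_value_string_alt (value : Int) (base : Int) : String :=
  let d0 := PySem.Int.mod value base
  let n := Int.tdiv value base
  if value < base then PySem.Int.toStr value
  else if d0 = 0 ∧ n < base then "0," ++ PySem.Int.toStr n
  else PySem.Str.join "," ((d0 :: pvDigits16 n).map PySem.Int.toStr)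

-- ===== PRECONDITION & SPEC =====
-- Pre_ excludes only base = 0, where Python A raises ZeroDivisionError (so does B).
def Pre_get_hexa_value_string (value : Int) (base : Int) : Prop := base ≠ 0
instance (value : Int) (base : Int) : Decidable (Pre_get_hexa_value_string value base) := by unfold Pre_get_hexa_value_string; infer_instance
def pvWitness_get_hexa_value_string : Int × Int := (300, 16)

def Spec_get_hexa_value_string (value : Int) (base : Int) (out : String) : Prop := out = get_hexa_value_string_alt value base
instance (value : Int) (base : Int) (out : String) : Decidable (Spec_get_hexa_value_string value base out) := by unfold Spec_get_hexa_value_string; infer_instance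

-- ===== CLAIM (what is proved, stated in full; the proofs are below) =====
def Claim_equal_get_hexa_value_string : Prop := ∀ (value : Int) (base : Int), Dom_get_hexa_value_string value base → Pre_get_hexa_value_string value base → Spec_get_hexa_value_string value base (get_hexa_value_string value base)

-- ===== LEMMAS AND PROOFS =====

theorem pvDigits16_ne_nil (n : Int) : pvDigits16 n ≠ [] := by
  unfold pvDigits16
  split <;> simp

theorem join_singleton_toStr (m : Int) :
    PySem.Str.join "," ([m].map PySem.Int.toStr) = PySem.Int.toStr m := by
  apply String.toList_inj.mp
  simp [PySem.Str.toList_join, PySem.Chars.join_singleton]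

theorem join_toStr_cons (d : Int) (l : List Int) (hl : l ≠ []) :
    PySem.Str.join "," ((d :: l).map PySem.Int.toStr) =
      PySem.Int.toStr d ++ "," ++ PySem.Str.join "," (l.map PySem.Int.toStr) := by
  obtain ⟨x, rest, rfl⟩ := List.exists_cons_of_ne_nil hl
  apply String.toList_inj.mp
  simp [PySem.Str.toList_join, PySem.Chars.join_cons_cons]

-- A's base-16 recursion computes exactly the comma-join of the LSB-first digit list.
theorem rec16_eq_join (n : Int) :
    get_hexa_value_string n 16 = PySem.Str.join "," ((pvDigits16 n).map PySem.Int.toStr) := by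
  induction n using pvDigits16.induct with
  | case1 n h ih =>
    rw [get_hexa_value_string, pvDigits16]
    rw [if_pos h, if_neg (by omega), join_toStr_cons _ _ (pvDigits16_ne_nil _)]
    by_cases h0 : PySem.Int.mod n 16 = 0
    · rw [if_pos h0, h0]
      by_cases hlt : Int.tdiv n 16 < 16
      · rw [if_pos hlt]
        rw [pvDigits16, if_neg (by omega), join_singleton_toStr]
        rfl
      · rw [if_neg hlt, ih]
        rfl
    · rw [if_neg h0, ih]
  | case2 n h =>
    rw [get_hexa_value_string, pvDigits16]
    rw [if_neg h, if_pos (by omega), join_singleton_toStr]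

theorem main_eq (value base : Int) (hb : base ≠ 0) :
    get_hexa_value_string value base = get_hexa_value_string_alt value base := by
  rw [get_hexa_value_string, get_hexa_value_string_alt]
  by_cases hlt : value < base
  · rw [if_pos hlt, if_pos hlt]
  · rw [if_neg hlt, if_neg hlt]
    by_cases h0 : PySem.Int.mod value base = 0
    · rw [if_pos h0]
      by_cases hn : Int.tdiv value base < base
      · rw [if_pos hn, if_pos ⟨h0, hn⟩]
        apply String.toList_inj.mp
        simp
      · rw [if_neg hn, if_neg (by tauto), h0, rec16_eq_join,
          join_toStr_cons _ _ (pvDigits16_ne_nil _)]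
        apply String.toList_inj.mp
        simp [PySem.Int.toList_toStr]
        rfl
    · rw [if_neg h0, if_neg (by tauto), rec16_eq_join,
        join_toStr_cons _ _ (pvDigits16_ne_nil _)]

-- ===== VERDICT (by name: the statement is the Claim_ definition above) =====
theorem get_hexa_value_string_spec : Claim_equal_get_hexa_value_string := by
  intro value base _ hpre
  exact main_eq value base hpre
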